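-- pv_equiv track=rewrite | github.com/andreicomsc/Adventure-Game-Python | gameparser.py | normalise_input
-- ===== SOURCE A (Python) =====
-- import string, time, sys
--
-- skip_words = ['a', 'about', 'all', 'an', 'another', 'any', 'around', 'at',
--               'bad', 'beautiful', 'been', 'better', 'big', 'can', 'every', 'for',
--               'from', 'good', 'have', 'her', 'here', 'hers', 'his', 'how',
--               'i', 'if', 'in', 'into', 'is', 'it', 'its', 'large', 'later',
--               'like', 'little', 'main', 'me', 'more', 'my', 'now',
--               'of', 'off', 'oh', 'on', 'please', 'small', 'some', 'soon',
--               'that', 'the', 'then', 'this', 'those', 'till', 'to',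
--               'towards', 'until', 'us', 'want', 'we', 'what', 'when', 'why',
--               'wish', 'with', 'would', '']
--
-- def filter_words(words, filter):
--     i = 0
--     while i < len(words):
--         currentword = words[i]
--         if currentword in filter:
--             words.remove(currentword)
--         else:
--             i += 1
--
--     return words
--
-- def remove_punct(text):
--     no_punct = ""
--     for char in text:
--         if not (char in string.punctuation):
--             no_punct = no_punct + char
--
--     return no_punct
--
-- def normalise_input(user_input):
--     # Remove punctuation and convert to lower case
--     text = remove_punct(user_input).lower()
--
--     ## REMOVES WHITE SPACES
--     while True:
--         if len(text) == 0:
--             break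
--         elif text[0] == " ":
--             text = text[1:len(text)]
--         else:
--             break
--     while True:
--         if len(text) == 0:
--             break
--         elif text[len(text) - 1] == " ":
--             text = text[0:len(text) - 1]
--         else:
--             break
--     text = text.split(" ")
--     text = filter_words(text, skip_words)
--     if len(text) == 3:
--         text = [text[0], text[1] + text[2]]
--     if len(text) < 2:
--         return ["placeholder", "placeholder"]
--
--     return text
-- ===== SOURCE B (Python) =====
-- import string
--
-- SKIP = {'a', 'about', 'all', 'an', 'another', 'any', 'around', 'at',
--         'bad', 'beautiful', 'been', 'better', 'big', 'can', 'every', 'for',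
--         'from', 'good', 'have', 'her', 'here', 'hers', 'his', 'how',
--         'i', 'if', 'in', 'into', 'is', 'it', 'its', 'large', 'later',
--         'like', 'little', 'main', 'me', 'more', 'my', 'now',
--         'of', 'off', 'oh', 'on', 'please', 'small', 'some', 'soon',
--         'that', 'the', 'then', 'this', 'those', 'till', 'to',
--         'towards', 'until', 'us', 'want', 'we', 'what', 'when', 'why',
--         'wish', 'with', 'would'}
--
-- _PUNCT = set(string.punctuation)
--
-- def normalise_input(user_input):
--     # One pass over the raw input: drop punctuation, split on spaces on the
--     # fly, lower-case characters as they are buffered, keep non-stop-words.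
--     tokens = []
--     buf = ""
--     for ch in user_input:
--         if ch in _PUNCT:
--             continue
--         elif ch == ' ':
--             if buf and buf not in SKIP:
--                 tokens.append(buf)
--             buf = ""
--         else:
--             buf += ch.lower()
--     if buf and buf not in SKIP:
--         tokens.append(buf)
--     if len(tokens) == 3:
--         tokens = [tokens[0], tokens[1] + tokens[2]]
--     if len(tokens) < 2:
--         return ["placeholder", "placeholder"]
--     return tokens
-- ===== Notes on version B (the rewrite author's own statement) =====
-- stated objective: alternative
-- what changed: Replaces A's multi-pass pipeline (punctuation rebuild by repeated concatenation, lower, two char-by-char strip loops, split, and a remove-while-scanning stop-word filter with quadratic worst case) with a single character scan that buffers the current token and emits non-empty non-stop-word tokens directly, using a set for stop words; it trades A's C-level str built-ins for one explicit Python loop, so it is not measurably faster.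
import Mathlib
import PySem

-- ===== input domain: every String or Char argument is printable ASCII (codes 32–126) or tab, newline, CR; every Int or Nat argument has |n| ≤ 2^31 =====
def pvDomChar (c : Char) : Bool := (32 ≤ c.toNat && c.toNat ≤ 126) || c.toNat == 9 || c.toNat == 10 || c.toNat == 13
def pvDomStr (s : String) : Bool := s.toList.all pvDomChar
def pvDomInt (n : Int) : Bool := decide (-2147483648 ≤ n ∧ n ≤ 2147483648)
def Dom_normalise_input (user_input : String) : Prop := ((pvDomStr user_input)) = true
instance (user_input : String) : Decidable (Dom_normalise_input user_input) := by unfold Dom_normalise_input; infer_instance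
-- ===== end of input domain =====

-- B replaces A's multi-pass pipeline (punctuation removal, lower, strip, split, stop-word filter) by a single character scan; return values proved equal for all inputs.

-- ===== PORT A =====
-- string.punctuation
def pyPunctA : List Char := "!\"#$%&'()*+,-./:;<=>?@[\\]^_`{|}~".toList

-- skip_words (module constant; '' is its last element)
def skipWordsA : List (List Char) :=
  ["a", "about", "all", "an", "another", "any", "around", "at",
   "bad", "beautiful", "been", "better", "big", "can", "every", "for",
   "from", "good", "have", "her", "here", "hers", "his", "how",
   "i", "if", "in", "into", "is", "it", "its", "large", "later",
   "like", "little", "main", "me", "more", "my", "now",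
   "of", "off", "oh", "on", "please", "small", "some", "soon",
   "that", "the", "then", "this", "those", "till", "to",
   "towards", "until", "us", "want", "we", "what", "when", "why",
   "wish", "with", "would", ""].map String.toList

-- remove_punct: builds the output by appending each non-punctuation char
def removePunct (text : List Char) : List Char :=
  text.foldl (fun acc c => if !(pyPunctA.contains c) then acc ++ [c] else acc) []

-- first while loop: drop leading spaces one at a time
def stripLead : List Char → List Char
  | [] => []
  | c :: rest => if c = ' ' then stripLead rest else c :: rest

-- second while loop: drop trailing spaces one at a time
def stripTrail (t : List Char) : List Char :=
  if h : t.getLast? = some ' ' then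
    stripTrail t.dropLast
  else t
termination_by t.length
decreasing_by
  have ht : t ≠ [] := by intro he; subst he; simp at h
  have h0 : 0 < t.length := List.length_pos_of_ne_nil ht
  simp [List.length_dropLast]
  omega

-- filter_words: index loop with in-place remove of the current word
def filterWordsGo (words : List (List Char)) (i : Nat) : List (List Char) :=
  if h : i < words.length then
    let currentword := words[i]
    if skipWordsA.contains currentword then
      filterWordsGo ((PySem.List.remove? words currentword).getD words) i
    else
      filterWordsGo words (i + 1)
  else words
termination_by words.length - i
decreasing_by
  · have hmem : words[i] ∈ words := List.getElem_mem h
    rw [PySem.List.remove?_eq_some_erase _ _ hmem, Option.getD_some]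
    have := List.length_erase_of_mem hmem
    omega
  · omega

def normalise_input (user_input : String) : List String :=
  let text := PySem.Chars.lower (removePunct user_input.toList)
  let text := stripLead text
  let text := stripTrail text
  let words := PySem.Chars.splitOn text [' ']
  let words := filterWordsGo words 0
  let words := if words.length = 3 then [words[0]!, words[1]! ++ words[2]!] else words
  if words.length < 2 then ["placeholder", "placeholder"]
  else words.map String.ofList

-- ===== PORT B =====
-- SKIP (a set; no '' entry)
def skipWordsB : PySem.Set (List Char) :=
  PySem.Set.ofList
    (["a", "about", "all", "an", "another", "any", "around", "at",
      "bad", "beautiful", "been", "better", "big", "can", "every", "for",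
      "from", "good", "have", "her", "here", "hers", "his", "how",
      "i", "if", "in", "into", "is", "it", "its", "large", "later",
      "like", "little", "main", "me", "more", "my", "now",
      "of", "off", "oh", "on", "please", "small", "some", "soon",
      "that", "the", "then", "this", "those", "till", "to",
      "towards", "until", "us", "want", "we", "what", "when", "why",
      "wish", "with", "would"].map String.toList)

-- _PUNCT = set(string.punctuation)
def pyPunctB : PySem.Set Char := PySem.Set.ofList "!\"#$%&'()*+,-./:;<=>?@[\\]^_`{|}~".toList

-- loop body: skip punctuation, flush the buffer on a space, else buffer the lowered char
def stepB (st : List Char × List (List Char)) (c : Char) : List Char × List (List Char) :=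
  if PySem.Set.contains pyPunctB c then st
  else if c = ' ' then
    ([], if !st.1.isEmpty && !(PySem.Set.contains skipWordsB st.1) then st.2 ++ [st.1] else st.2)
  else (st.1 ++ [PySem.Chars.lowerChar c], st.2)

def normalise_input_alt (user_input : String) : List String :=
  let st := user_input.toList.foldl stepB ([], [])
  let tokens := if !st.1.isEmpty && !(PySem.Set.contains skipWordsB st.1) then st.2 ++ [st.1] else st.2
  let tokens := if tokens.length = 3 then [tokens[0]!, tokens[1]! ++ tokens[2]!] else tokens
  if tokens.length < 2 then ["placeholder", "placeholder"]
  else tokens.map String.ofList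

-- ===== PRECONDITION & SPEC =====
def Spec_normalise_input (user_input : String) (out : List String) : Prop := out = normalise_input_alt user_input
instance (user_input : String) (out : List String) : Decidable (Spec_normalise_input user_input out) := by unfold Spec_normalise_input; infer_instance

-- ===== CLAIM (what is proved, stated in full; the proofs are below) =====
def Claim_equal_normalise_input : Prop := ∀ (user_input : String), Dom_normalise_input user_input → Spec_normalise_input user_input (normalise_input user_input)

-- ===== LEMMAS AND PROOFS =====

-- token emitted by B's flush
def emitTok (b : List Char) : List (List Char) :=
  if !b.isEmpty && !(PySem.Set.contains skipWordsB b) then [b] else []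

-- reference tokenizer: split on ' ' keeping only non-empty non-stop-word tokens
def wordsAux : List Char → List Char → List (List Char)
  | buf, [] => emitTok buf
  | buf, c :: cs => if c = ' ' then emitTok buf ++ wordsAux [] cs else wordsAux (buf ++ [c]) cs

-- plain split on ' ' (all pieces, including empty ones)
def splitSp : List Char → List Char → List (List Char)
  | buf, [] => [buf]
  | buf, c :: cs => if c = ' ' then buf :: splitSp [] cs else splitSp (buf ++ [c]) cs

-- the keep-predicate of A's filter_words
def keepP (w : List Char) : Bool := !(skipWordsA.contains w)

theorem pyPunctB_eq (c : Char) : PySem.Set.contains pyPunctB c = pyPunctA.contains c := by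
  rfl

set_option maxRecDepth 20000 in
theorem skipA_eq : skipWordsA = skipWordsB ++ [[]] := by rfl

theorem keepP_eq (w : List Char) :
    keepP w = (!w.isEmpty && !(PySem.Set.contains skipWordsB w)) := by
  unfold keepP PySem.Set.contains
  rw [skipA_eq, List.contains_append]
  cases w with
  | nil =>
    have h1 : List.contains [([] : List Char)] ([] : List Char) = true := by decide
    rw [h1]
    simp
  | cons c cs =>
    have h1 : List.contains [([] : List Char)] (c :: cs) = false := by
      simp [List.contains_eq_mem]
    rw [h1]
    simp

theorem keepP_nil : keepP [] = false := by decide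

theorem lowerChar_space_iff (c : Char) : PySem.Chars.lowerChar c = ' ' ↔ c = ' ' := by
  constructor
  · unfold PySem.Chars.lowerChar PySem.Chars.isupper
    split
    · rename_i hu
      simp only [Bool.and_eq_true, decide_eq_true_eq] at hu
      intro he
      have h1 : c.toNat ≤ 90 := by have := hu.2; rw [Char.le_def] at this; exact_mod_cast this
      have h0 : 65 ≤ c.toNat := by have := hu.1; rw [Char.le_def] at this; exact_mod_cast this
      have h2 : (Char.ofNat (c.toNat + 32)).toNat = 32 := by rw [he]; decide
      rw [Char.toNat_ofNat, if_pos (Or.inl (by omega))] at h2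
      omega
    · exact id
  · intro h; subst h; decide

theorem removePunct_eq (t : List Char) :
    removePunct t = t.filter (fun c => !(pyPunctA.contains c)) := by
  unfold removePunct
  simpa using PySem.List.foldl_append_if (fun c => !(pyPunctA.contains c)) id t []

theorem splitSp_append_space (l : List Char) :
    ∀ buf, splitSp buf (l ++ [' ']) = splitSp buf l ++ [[]] := by
  induction l with
  | nil => intro buf; simp [splitSp]
  | cons c cs ih => intro buf; by_cases hc : c = ' ' <;> simp [splitSp, hc, ih]

theorem filter_splitSp_stripLead (l : List Char) :
    (splitSp [] (stripLead l)).filter keepP = (splitSp [] l).filter keepP := by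
  induction l with
  | nil => rfl
  | cons c cs ih =>
    by_cases hc : c = ' '
    · subst hc; simp [stripLead, splitSp, ih, keepP_nil]
    · simp [stripLead, hc]

theorem filter_splitSp_stripTrail (l : List Char) :
    (splitSp [] (stripTrail l)).filter keepP = (splitSp [] l).filter keepP := by
  fun_induction stripTrail l with
  | case1 t h ih =>
    obtain ⟨l', a, hl, ha⟩ : ∃ l' a, t = l' ++ [a] ∧ a = ' ' := by
      have := List.getLast?_eq_some_iff.mp h
      obtain ⟨l', hl⟩ := this
      exact ⟨l', ' ', hl, rfl⟩
    subst ha hl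
    rw [List.dropLast_concat] at ih ⊢
    rw [ih, splitSp_append_space, List.filter_append]
    simp [keepP_nil]
  | case2 t h => rfl

theorem splitOn_go_eq (fuel : Nat) :
    ∀ (l cur : List Char) (accs : List (List Char)), l.length < fuel →
      PySem.Chars.splitOn.go [' '] fuel l cur accs = accs.reverse ++ splitSp cur.reverse l := by
  induction fuel with
  | zero => intro l cur accs h; omega
  | succ fuel ih =>
    intro l cur accs h
    cases l with
    | nil => simp [PySem.Chars.splitOn.go, splitSp]
    | cons c rest =>
      rw [PySem.Chars.splitOn.go]
      by_cases hc : c = ' '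
      · subst hc
        have hp : List.isPrefixOf [' '] (' ' :: rest) = true := by
          simp [List.isPrefixOf]
        rw [if_pos hp]
        have hr : rest.length < fuel := by simp at h; omega
        rw [show List.drop (List.length [' ']) (' ' :: rest) = rest from rfl]
        rw [ih rest [] (cur.reverse :: accs) hr]
        simp [splitSp]
      · have hp : List.isPrefixOf [' '] (c :: rest) = false := by
          simp [List.isPrefixOf]
          exact fun h' => hc h'.symm
        rw [if_neg (by simp [hp])]
        have hr : rest.length < fuel := by simp at h; omega
        rw [ih rest (c :: cur) accs hr]
        simp [splitSp, hc]

theorem splitOn_eq_splitSp (l : List Char) :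
    PySem.Chars.splitOn l [' '] = splitSp [] l := by
  unfold PySem.Chars.splitOn
  rw [splitOn_go_eq (l.length + 1) l [] [] (by omega)]
  rfl

theorem filterWordsGo_eq (words : List (List Char)) (i : Nat)
    (h : ∀ w ∈ words.take i, skipWordsA.contains w = false) :
    filterWordsGo words i = words.take i ++ (words.drop i).filter keepP := by
  fun_induction filterWordsGo words i with
  | case1 words i hi cw hskip ih =>
    have hmem : cw ∈ words := List.getElem_mem hi
    have hrem : (PySem.List.remove? words cw).getD words = words.erase cw := by
      rw [PySem.List.remove?_eq_some_erase _ _ hmem]; rfl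
    have hnot : cw ∉ words.take i := by
      intro hmt
      have := h cw hmt
      rw [this] at hskip
      cases hskip
    have hdrop : words.drop i = cw :: words.drop (i + 1) := List.drop_eq_getElem_cons hi
    have herase : words.erase cw = words.take i ++ words.drop (i + 1) := by
      conv_lhs => rw [← List.take_append_drop i words, hdrop]
      rw [List.erase_append_right _ hnot, List.erase_cons_head]
    have hlen : (words.take i).length = i := by
      rw [List.length_take]; omega
    have htake' : (words.take i ++ words.drop (i + 1)).take i = words.take i := by
      rw [List.take_append_of_le_length (by omega), List.take_take]
      simp
    have hdrop' : (words.take i ++ words.drop (i + 1)).drop i = words.drop (i + 1) := by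
      rw [List.drop_append]
      simp [hlen, List.drop_of_length_le]
    rw [hrem, herase] at ih
    rw [hrem, herase]
    rw [ih (by rw [htake']; exact h), htake', hdrop', hdrop, List.filter_cons]
    have hk : keepP cw = false := by unfold keepP; rw [hskip]; rfl
    simp [hk]
  | case2 words i hi cw hskip ih =>
    have htake1 : words.take (i + 1) = words.take i ++ [cw] := by
      rw [List.take_add_one, List.getElem?_eq_getElem hi]
      rfl
    have hdrop : words.drop i = cw :: words.drop (i + 1) := List.drop_eq_getElem_cons hi
    have pre : ∀ w ∈ words.take (i + 1), skipWordsA.contains w = false := by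
      rw [htake1]
      intro w hw
      rcases List.mem_append.mp hw with hw | hw
      · exact h w hw
      · rw [List.mem_singleton.mp hw, List.contains_eq_mem]
        simpa using hskip
    have hk : keepP cw = true := by
      unfold keepP
      rw [List.contains_eq_mem]
      simpa using hskip
    rw [ih pre, htake1, hdrop, List.filter_cons, hk]
    simp
  | case3 words i hi =>
    rw [List.take_of_length_le (by omega), List.drop_of_length_le (by omega)]
    simp

theorem filter_splitSp_eq_wordsAux (l : List Char) :
    ∀ buf, (splitSp buf l).filter keepP = wordsAux buf l := by
  induction l with
  | nil =>
    intro buf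
    show [buf].filter keepP = emitTok buf
    rw [List.filter_cons, keepP_eq]
    unfold emitTok
    cases hb : (!buf.isEmpty && !(PySem.Set.contains skipWordsB buf)) <;> simp
  | cons c cs ih =>
    intro buf
    by_cases hc : c = ' '
    · subst hc
      show (buf :: splitSp [] cs).filter keepP = emitTok buf ++ wordsAux [] cs
      rw [List.filter_cons, keepP_eq, ih]
      unfold emitTok
      cases hb : (!buf.isEmpty && !(PySem.Set.contains skipWordsB buf)) <;> simp
    · simp [splitSp, wordsAux, hc, ih]

theorem foldl_stepB_eq (l : List Char) :
    ∀ (buf : List Char) (out : List (List Char)),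
      (fun st : List Char × List (List Char) =>
          if !st.1.isEmpty && !(PySem.Set.contains skipWordsB st.1) then st.2 ++ [st.1] else st.2)
        (l.foldl stepB (buf, out))
      = out ++ wordsAux buf ((l.filter (fun c => !(pyPunctA.contains c))).map PySem.Chars.lowerChar) := by
  induction l with
  | nil =>
    intro buf out
    show (if !buf.isEmpty && !(PySem.Set.contains skipWordsB buf) then out ++ [buf] else out)
      = out ++ emitTok buf
    unfold emitTok
    cases hb : (!buf.isEmpty && !(PySem.Set.contains skipWordsB buf)) <;> simp
  | cons c cs ih =>
    intro buf out
    rw [List.foldl_cons, List.filter_cons]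
    by_cases hp : PySem.Set.contains pyPunctB c = true
    · have hpA : pyPunctA.contains c = true := by rw [← pyPunctB_eq c]; exact hp
      rw [show stepB (buf, out) c = (buf, out) from by unfold stepB; rw [if_pos hp]]
      simp only [hpA, Bool.not_true, Bool.false_eq_true]
      exact ih buf out
    · have hpA : pyPunctA.contains c = false := by
        rw [← pyPunctB_eq c]; exact eq_false_of_ne_true hp
      simp only [hpA, Bool.not_false, if_pos trivial]
      by_cases hc : c = ' '
      · subst hc
        rw [show stepB (buf, out) ' '
            = ([], if !buf.isEmpty && !(PySem.Set.contains skipWordsB buf) then out ++ [buf] else out)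
          from by unfold stepB; rw [if_neg hp, if_pos rfl]]
        have h2 := ih [] (if !buf.isEmpty && !(PySem.Set.contains skipWordsB buf) then out ++ [buf] else out)
        simp only [] at h2
        rw [h2]
        rw [List.map_cons, show PySem.Chars.lowerChar ' ' = ' ' from by decide]
        show _ = out ++ (if ' ' = ' ' then emitTok buf ++ wordsAux [] _ else _)
        rw [if_pos rfl]
        unfold emitTok
        cases hb : (!buf.isEmpty && !(PySem.Set.contains skipWordsB buf)) <;> simp
      · rw [show stepB (buf, out) c = (buf ++ [PySem.Chars.lowerChar c], out)
          from by unfold stepB; rw [if_neg hp, if_neg hc]]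
        have h2 := ih (buf ++ [PySem.Chars.lowerChar c]) out
        simp only [] at h2
        rw [h2, List.map_cons]
        have hlc : ¬ (PySem.Chars.lowerChar c = ' ') := fun h => hc ((lowerChar_space_iff c).mp h)
        show _ = out ++ (if PySem.Chars.lowerChar c = ' ' then _ else wordsAux (buf ++ [PySem.Chars.lowerChar c]) _)
        rw [if_neg hlc]

theorem tokens_eq (cs : List Char) :
    filterWordsGo (PySem.Chars.splitOn (stripTrail (stripLead (PySem.Chars.lower (removePunct cs)))) [' ']) 0
      = (fun st : List Char × List (List Char) =>
          if !st.1.isEmpty && !(PySem.Set.contains skipWordsB st.1) then st.2 ++ [st.1] else st.2)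
        (cs.foldl stepB ([], [])) := by
  rw [filterWordsGo_eq _ 0 (by simp)]
  rw [List.take_zero, List.drop_zero, List.nil_append]
  rw [splitOn_eq_splitSp, filter_splitSp_stripTrail, filter_splitSp_stripLead]
  rw [filter_splitSp_eq_wordsAux]
  rw [foldl_stepB_eq cs [] []]
  rw [List.nil_append]
  rw [removePunct_eq]
  rfl

-- ===== VERDICT (by name: the statement is the Claim_ definition above) =====
theorem normalise_input_spec : Claim_equal_normalise_input := by
  intro s _
  unfold Spec_normalise_input normalise_input normalise_input_alt
  have htok := tokens_eq s.toList
  simp only [] at htok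
  simp only [htok]
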